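-- pv_equiv track=rewrite | github.com/junesk9/Codes.from.Articles | search.prom_motif.220528.py | PrepareCisList
-- ===== SOURCE A (Python) =====
-- cis_revcomp = True ## Also count rev-comp cis-elements
--
-- def RevComp(seq):
--     rev_d = {"A":"T","T":"A","C":"G","G":"C","N":"N"}
--
--     seq = seq.upper()
--     seq = [i for i in seq]
--     comp = []
--     for s in seq:
--         try:
--             c = rev_d[s]
--         except KeyError:
--             c = "N"
--         comp.append(c)
--     revcomp = comp[::-1]
--     revcomp = "".join(revcomp)
--
--     return revcomp
--
-- def PrepareCisList(cis):
--     new_ls = []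
--     cis_ls = cis if isinstance(cis, list) else [cis]
--
--     for c in cis_ls:
--         if "N" in c:
--             c = c.split("N")
--             for n in ["A","T","G","C"]:
--                 new_c = n.join(c)
--                 new_ls.append(new_c)
--                 if cis_revcomp:
--                     new_ls.append(RevComp(new_c))
--                 else: pass
--         else:
--             new_ls.append(c)
--             if cis_revcomp:
--                 new_ls.append(RevComp(c))
--             else: pass
--     new_ls = sorted(list(set(new_ls)))
--
--     return new_ls
-- ===== SOURCE B (Python) =====
-- cis_revcomp = True ## Also count rev-comp cis-elements
--
-- def RevComp(seq):
--     rev_d = {"A":"T","T":"A","C":"G","G":"C","N":"N"}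
--     return "".join(rev_d.get(ch, "N") for ch in reversed(seq.upper()))
--
-- def _insert_sorted_unique(ls, x):
--     # keep ls sorted and duplicate-free: skip x if present, else insert in order
--     for i, y in enumerate(ls):
--         if x == y:
--             return
--         if x < y:
--             ls.insert(i, x)
--             return
--     ls.append(x)
--
-- def PrepareCisList(cis):
--     # Maintain a sorted, duplicate-free accumulator by ordered insertion:
--     # no set, no final sort.  c.replace("N", n) equals n.join(c.split("N")),
--     # and for a motif without "N" it is c for every n, so the dedup-on-insert
--     # collapses those four identical entries.
--     cis_ls = cis if isinstance(cis, list) else [cis]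
--     out = []
--     for c in cis_ls:
--         for n in "ATGC":
--             v = c.replace("N", n)
--             _insert_sorted_unique(out, v)
--             if cis_revcomp:
--                 _insert_sorted_unique(out, RevComp(v))
--     return out
-- ===== Notes on version B (the rewrite author's own statement) =====
-- stated objective: alternative
-- what changed: B never builds the raw expansion list at all: it maintains one sorted, duplicate-free accumulator by ordered insertion (dedup-on-insert), replacing A's collect/branch-on-N/set()/sorted() pipeline with a uniform replace('N',n) pass; RevComp is rewritten as a single reversed-generator join. Trade-off: ordered insertion is quadratic in the number of distinct results, so B is slower than A on large inputs.
import Mathlib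
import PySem

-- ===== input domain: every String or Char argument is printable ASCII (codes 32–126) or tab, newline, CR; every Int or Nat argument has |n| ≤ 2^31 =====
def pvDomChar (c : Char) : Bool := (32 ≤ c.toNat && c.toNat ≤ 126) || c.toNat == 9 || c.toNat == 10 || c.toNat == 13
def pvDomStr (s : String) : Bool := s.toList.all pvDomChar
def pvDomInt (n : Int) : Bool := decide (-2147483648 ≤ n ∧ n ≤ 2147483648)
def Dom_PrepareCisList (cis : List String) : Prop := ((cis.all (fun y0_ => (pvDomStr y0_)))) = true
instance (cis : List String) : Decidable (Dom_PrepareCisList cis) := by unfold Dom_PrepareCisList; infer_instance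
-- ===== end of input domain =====

-- B never builds the raw expansion list: it keeps ONE sorted, duplicate-free accumulator by
-- ordered insertion (dedup-on-insert), replacing A's collect / branch-on-N / set() / sorted()
-- pipeline with a uniform replace('N', n) pass (objective: alternative decomposition).

-- ===== PORT A =====

-- module constant cis_revcomp = True
def pvCisRevcomp : Bool := true

-- helper RevComp as A writes it: map each char, then reverse with [::-1]
def pvRevComp (seq : String) : String :=
  let rev_d : PySem.Dict Char Char :=
    PySem.Dict.ofList [('A', 'T'), ('T', 'A'), ('C', 'G'), ('G', 'C'), ('N', 'N')]
  let sequ := PySem.Str.upper seq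
  let seqL := sequ.toList
  -- try rev_d[s] except KeyError: "N"  →  getD 'N'
  let comp := seqL.map (fun s => (rev_d.get? s).getD 'N')
  -- comp[::-1]: step -1 ≠ 0, so slice? is always `some` here (PySem.List.slice?_none_none_neg_one)
  let revcomp := (PySem.List.slice? comp none none (-1)).getD []
  String.ofList revcomp

def PrepareCisList (cis : List String) : List String :=
  -- isinstance(cis, list) is True for this signature, so cis_ls = cis
  let cis_ls := cis
  let new_ls := cis_ls.foldl (fun new_ls c =>
    if PySem.Str.isIn "N" c then
      let cParts := PySem.Chars.splitOn c.toList "N".toList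
      ["A", "T", "G", "C"].foldl (fun new_ls n =>
        let new_c := String.ofList (PySem.Chars.join n.toList cParts)
        let new_ls := new_ls ++ [new_c]
        if pvCisRevcomp then new_ls ++ [pvRevComp new_c] else new_ls) new_ls
    else
      let new_ls := new_ls ++ [c]
      if pvCisRevcomp then new_ls ++ [pvRevComp c] else new_ls) []
  PySem.List.sorted (PySem.Set.ofList new_ls) (fun x => x)

-- ===== PORT B =====

-- B's RevComp: one pass over reversed(seq.upper()), joined
def pvRevCompB (seq : String) : String :=
  let rev_d : PySem.Dict Char Char :=
    PySem.Dict.ofList [('A', 'T'), ('T', 'A'), ('C', 'G'), ('G', 'C'), ('N', 'N')]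
  String.ofList (((PySem.Str.upper seq).toList.reverse).map (fun ch => rev_d.getD ch 'N'))

-- B's _insert_sorted_unique: walk the sorted list; drop x if present, insert before the
-- first larger element, else append (transliteration of the enumerate loop)
def pvInsSU : List String → String → List String
  | [], x => [x]
  | y :: t, x => if x == y then y :: t else if x < y then x :: y :: t else y :: pvInsSU t x

def PrepareCisList_alt (cis : List String) : List String :=
  let cis_ls := cis
  cis_ls.foldl (fun out c =>
    "ATGC".toList.foldl (fun out n =>
      let v := PySem.Str.replace c "N" (String.ofList [n])
      let out := pvInsSU out v
      if pvCisRevcomp then pvInsSU out (pvRevCompB v) else out) out) []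

-- ===== PRECONDITION & SPEC =====
def Spec_PrepareCisList (cis : List String) (out : List String) : Prop := out = PrepareCisList_alt cis
instance (cis : List String) (out : List String) : Decidable (Spec_PrepareCisList cis out) := by unfold Spec_PrepareCisList; infer_instance

-- ===== CLAIM =====
def Claim_equal_PrepareCisList : Prop := ∀ (cis : List String), Dom_PrepareCisList cis → Spec_PrepareCisList cis (PrepareCisList cis)

-- ===== LEMMAS AND PROOFS =====

-- the two RevComps agree
theorem pvRevCompB_eq (seq : String) : pvRevCompB seq = pvRevComp seq := by
  simp only [pvRevCompB, pvRevComp, PySem.List.slice?_none_none_neg_one, Option.getD_some,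
    PySem.Dict.getD_eq_get?_getD, List.map_reverse]

-- substituting every 'N' by n, as a per-character map
def pvSub (n : Char) (c : Char) : Char := if c = 'N' then n else c

-- accumulator-free form of Chars.splitOn on the one-character separator ['N']
def pvMySplit : List Char → List Char → List (List Char)
  | [], cur => [cur.reverse]
  | c :: t, cur => if c = 'N' then cur.reverse :: pvMySplit t [] else pvMySplit t (c :: cur)

theorem pvPrefN (c : Char) (t : List Char) : (['N'].isPrefixOf (c :: t)) = ('N' == c) := by
  show (('N' == c) && ([].isPrefixOf t)) = ('N' == c)
  simp

theorem pvRepGoCons (n : Char) (f : Nat) (c : Char) (t acc : List Char) :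
    PySem.Chars.replace.go ['N'] [n] (f + 1) (c :: t) acc =
    (if c = 'N' then PySem.Chars.replace.go ['N'] [n] f t (n :: acc)
     else PySem.Chars.replace.go ['N'] [n] f t (c :: acc)) := by
  rw [PySem.Chars.replace.go]
  simp only [pvPrefN, beq_iff_eq]
  by_cases hc : c = 'N'
  · simp [hc]
  · have h2 : ¬ ('N' = c) := fun h => hc h.symm
    simp [h2, hc]

theorem pvRepGoNil (n : Char) (f : Nat) (acc : List Char) :
    PySem.Chars.replace.go ['N'] [n] f [] acc = acc.reverse := by
  cases f <;> (rw [PySem.Chars.replace.go]; simp)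

theorem pvSplGoCons (f : Nat) (c : Char) (t cur : List Char) (acc : List (List Char)) :
    PySem.Chars.splitOn.go ['N'] (f + 1) (c :: t) cur acc =
    (if c = 'N' then PySem.Chars.splitOn.go ['N'] f t [] (cur.reverse :: acc)
     else PySem.Chars.splitOn.go ['N'] f t (c :: cur) acc) := by
  rw [PySem.Chars.splitOn.go]
  simp only [pvPrefN, beq_iff_eq]
  by_cases hc : c = 'N'
  · simp [hc]
  · have h2 : ¬ ('N' = c) := fun h => hc h.symm
    simp [h2, hc]

theorem pvSplGoNil (f : Nat) (cur : List Char) (acc : List (List Char)) :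
    PySem.Chars.splitOn.go ['N'] f [] cur acc = (cur.reverse :: acc).reverse := by
  cases f <;> (rw [PySem.Chars.splitOn.go]; simp)

theorem pvReplace_go_single (n : Char) :
    ∀ (l : List Char) (fuel : Nat) (acc : List Char), l.length ≤ fuel →
      PySem.Chars.replace.go ['N'] [n] fuel l acc = acc.reverse ++ l.map (pvSub n) := by
  intro l
  induction l with
  | nil => intro fuel acc _; simp [pvRepGoNil]
  | cons c t ih =>
      intro fuel acc hle
      cases fuel with
      | zero => simp at hle
      | succ f =>
          have ht : t.length ≤ f := by simp at hle; omega
          rw [pvRepGoCons]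
          by_cases hc : c = 'N'
          · rw [if_pos hc, ih f (n :: acc) ht]
            simp [pvSub, hc]
          · rw [if_neg hc, ih f (c :: acc) ht]
            simp [pvSub, hc]

theorem pvSplitOn_go_single :
    ∀ (l : List Char) (fuel : Nat) (cur : List Char) (acc : List (List Char)), l.length ≤ fuel →
      PySem.Chars.splitOn.go ['N'] fuel l cur acc = acc.reverse ++ pvMySplit l cur := by
  intro l
  induction l with
  | nil => intro fuel cur acc _; simp [pvSplGoNil, pvMySplit]
  | cons c t ih =>
      intro fuel cur acc hle
      cases fuel with
      | zero => simp at hle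
      | succ f =>
          have ht : t.length ≤ f := by simp at hle; omega
          rw [pvSplGoCons]
          by_cases hc : c = 'N'
          · rw [if_pos hc, ih f [] (cur.reverse :: acc) ht]
            simp [pvMySplit, hc]
          · rw [if_neg hc, ih f (c :: cur) acc ht]
            simp [pvMySplit, hc]

theorem pvMySplit_ne_nil : ∀ (l cur : List Char), pvMySplit l cur ≠ [] := by
  intro l
  induction l with
  | nil => intro cur; simp [pvMySplit]
  | cons c t ih => intro cur; by_cases hc : c = 'N' <;> simp [pvMySplit, hc, ih]

theorem pvJoin_mySplit (n : Char) :
    ∀ (l cur : List Char), PySem.Chars.join [n] (pvMySplit l cur) = cur.reverse ++ l.map (pvSub n) := by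
  intro l
  induction l with
  | nil => intro cur; simp [pvMySplit, PySem.Chars.join_singleton]
  | cons c t ih =>
      intro cur
      by_cases hc : c = 'N'
      · obtain ⟨q, r, hqr⟩ : ∃ q r, pvMySplit t [] = q :: r := by
          cases h : pvMySplit t [] with
          | nil => exact absurd h (pvMySplit_ne_nil t [])
          | cons q r => exact ⟨q, r, rfl⟩
        rw [show pvMySplit (c :: t) cur = cur.reverse :: pvMySplit t [] from by simp [pvMySplit, hc]]
        rw [hqr, PySem.Chars.join_cons_cons, ← hqr, ih []]
        simp [pvSub, hc]
      · rw [show pvMySplit (c :: t) cur = pvMySplit t (c :: cur) from by simp [pvMySplit, hc]]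
        rw [ih (c :: cur)]
        simp [pvSub, hc]

theorem pvReplace_single (cs : List Char) (n : Char) :
    PySem.Chars.replace cs ['N'] [n] = cs.map (pvSub n) := by
  rw [PySem.Chars.replace]
  simp only [List.isEmpty_cons, Bool.false_eq_true, if_false]
  simpa using pvReplace_go_single n cs cs.length [] (le_refl _)

theorem pvSplitOn_single (cs : List Char) :
    PySem.Chars.splitOn cs ['N'] = pvMySplit cs [] := by
  rw [PySem.Chars.splitOn]
  simpa using pvSplitOn_go_single cs (cs.length + 1) [] [] (Nat.le_succ _)

theorem pvJoin_split (cs : List Char) (n : Char) :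
    PySem.Chars.join [n] (PySem.Chars.splitOn cs ['N']) = cs.map (pvSub n) := by
  rw [pvSplitOn_single, pvJoin_mySplit]; simp

theorem pvMap_sub_of_not_mem {cs : List Char} (h : 'N' ∉ cs) (n : Char) :
    cs.map (pvSub n) = cs := by
  have : cs.map (pvSub n) = cs.map id := by
    apply List.map_congr_left
    intro c hcmem
    have hcn : c ≠ 'N' := fun hcn => h (hcn ▸ hcmem)
    simp [pvSub, hcn]
  rw [this, List.map_id]

theorem pvIsIn_N_iff (c : String) : PySem.Str.isIn "N" c = true ↔ 'N' ∈ c.toList := by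
  rw [PySem.Str.isIn_iff_infix]
  constructor
  · rintro ⟨s, t, h⟩
    rw [← h]
    simp [show ("N" : String).toList = ['N'] from rfl]
  · intro h
    obtain ⟨s, t, h⟩ := List.mem_iff_append.mp h
    refine ⟨s, t, ?_⟩
    rw [h]
    simp [show ("N" : String).toList = ['N'] from rfl]

theorem pvReplace_str (c : String) (s : String) (n : Char) (hs : s.toList = [n]) :
    PySem.Str.replace c "N" s = String.ofList (c.toList.map (pvSub n)) := by
  have h := PySem.Str.toList_replace c "N" s
  rw [show PySem.Str.replace c "N" s = String.ofList ((PySem.Str.replace c "N" s).toList) from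
      (String.ofList_toList).symm, h, hs,
      show ("N" : String).toList = ['N'] from rfl, pvReplace_single]

-- the elements a single motif c contributes, per port
def pvChunkA (c : String) : List String :=
  if PySem.Str.isIn "N" c then
    ["A", "T", "G", "C"].flatMap (fun n =>
      [String.ofList (PySem.Chars.join n.toList (PySem.Chars.splitOn c.toList "N".toList)),
       pvRevComp (String.ofList (PySem.Chars.join n.toList (PySem.Chars.splitOn c.toList "N".toList)))])
  else [c, pvRevComp c]

def pvChunkB (c : String) : List String :=
  "ATGC".toList.flatMap (fun n =>
    [PySem.Str.replace c "N" (String.ofList [n]),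
     pvRevComp (PySem.Str.replace c "N" (String.ofList [n]))])

theorem pvChunkB_eq (c : String) :
    pvChunkB c =
      [PySem.Str.replace c "N" "A", pvRevComp (PySem.Str.replace c "N" "A"),
       PySem.Str.replace c "N" "T", pvRevComp (PySem.Str.replace c "N" "T"),
       PySem.Str.replace c "N" "G", pvRevComp (PySem.Str.replace c "N" "G"),
       PySem.Str.replace c "N" "C", pvRevComp (PySem.Str.replace c "N" "C")] := by
  simp only [pvChunkB,
    show ("ATGC" : String).toList = ['A', 'T', 'G', 'C'] from rfl,
    List.flatMap_cons, List.flatMap_nil, List.append_nil,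
    show String.ofList ['A'] = "A" from rfl, show String.ofList ['T'] = "T" from rfl,
    show String.ofList ['G'] = "G" from rfl, show String.ofList ['C'] = "C" from rfl]
  rfl

theorem pvChunkA_eq_of_isIn (c : String) (h : PySem.Str.isIn "N" c = true) :
    pvChunkA c =
      [String.ofList (PySem.Chars.join "A".toList (PySem.Chars.splitOn c.toList "N".toList)),
       pvRevComp (String.ofList (PySem.Chars.join "A".toList (PySem.Chars.splitOn c.toList "N".toList))),
       String.ofList (PySem.Chars.join "T".toList (PySem.Chars.splitOn c.toList "N".toList)),
       pvRevComp (String.ofList (PySem.Chars.join "T".toList (PySem.Chars.splitOn c.toList "N".toList))),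
       String.ofList (PySem.Chars.join "G".toList (PySem.Chars.splitOn c.toList "N".toList)),
       pvRevComp (String.ofList (PySem.Chars.join "G".toList (PySem.Chars.splitOn c.toList "N".toList))),
       String.ofList (PySem.Chars.join "C".toList (PySem.Chars.splitOn c.toList "N".toList)),
       pvRevComp (String.ofList (PySem.Chars.join "C".toList (PySem.Chars.splitOn c.toList "N".toList)))] := by
  simp only [pvChunkA, h, if_true, List.flatMap_cons, List.flatMap_nil, List.append_nil,
    List.cons_append, List.nil_append]

theorem pvJoinStr_eq_replace (c : String) (s : String) (n : Char) (hs : s.toList = [n]) :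
    String.ofList (PySem.Chars.join s.toList (PySem.Chars.splitOn c.toList "N".toList)) =
      PySem.Str.replace c "N" s := by
  rw [hs, show ("N" : String).toList = ['N'] from rfl, pvJoin_split, pvReplace_str c s n hs]

theorem pvChunk_mem (c : String) (x : String) : x ∈ pvChunkA c ↔ x ∈ pvChunkB c := by
  by_cases h : PySem.Str.isIn "N" c = true
  · have : pvChunkA c = pvChunkB c := by
      rw [pvChunkA_eq_of_isIn c h, pvChunkB_eq,
        pvJoinStr_eq_replace c "A" 'A' rfl, pvJoinStr_eq_replace c "T" 'T' rfl,
        pvJoinStr_eq_replace c "G" 'G' rfl, pvJoinStr_eq_replace c "C" 'C' rfl]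
    rw [this]
  · have hnot : 'N' ∉ c.toList := fun hm => h ((pvIsIn_N_iff c).mpr hm)
    have hrep : ∀ (s : String) (n : Char), s.toList = [n] → PySem.Str.replace c "N" s = c := by
      intro s n hs
      rw [pvReplace_str c s n hs, pvMap_sub_of_not_mem hnot, String.ofList_toList]
    have hB : pvChunkB c = [c, pvRevComp c, c, pvRevComp c, c, pvRevComp c, c, pvRevComp c] := by
      rw [pvChunkB_eq, hrep "A" 'A' rfl, hrep "T" 'T' rfl, hrep "G" 'G' rfl, hrep "C" 'C' rfl]
    have hA : pvChunkA c = [c, pvRevComp c] := by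
      simp only [pvChunkA, h, Bool.false_eq_true, if_false]
    rw [hA, hB]
    simp only [List.mem_cons, List.not_mem_nil, or_false]
    constructor
    · rintro (h1 | h1)
      · exact Or.inl h1
      · exact Or.inr (Or.inl h1)
    · rintro (h1 | h1 | h1 | h1 | h1 | h1 | h1 | h1)
      exacts [Or.inl h1, Or.inr h1, Or.inl h1, Or.inr h1, Or.inl h1, Or.inr h1, Or.inl h1, Or.inr h1]

-- A's loop collects exactly the chunks
theorem pvLoopA (l : List String) (acc : List String) :
    l.foldl (fun new_ls c =>
      if PySem.Str.isIn "N" c then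
        let cParts := PySem.Chars.splitOn c.toList "N".toList
        ["A", "T", "G", "C"].foldl (fun new_ls n =>
          let new_c := String.ofList (PySem.Chars.join n.toList cParts)
          let new_ls := new_ls ++ [new_c]
          if pvCisRevcomp then new_ls ++ [pvRevComp new_c] else new_ls) new_ls
      else
        let new_ls := new_ls ++ [c]
        if pvCisRevcomp then new_ls ++ [pvRevComp c] else new_ls) acc
    = acc ++ l.flatMap pvChunkA := by
  induction l generalizing acc with
  | nil => simp
  | cons c t ih =>
      rw [List.foldl_cons, ih]
      by_cases h : PySem.Str.isIn "N" c = true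
      · rw [if_pos h]
        simp only [List.foldl_cons, List.foldl_nil, pvCisRevcomp, if_true, List.flatMap_cons]
        rw [pvChunkA_eq_of_isIn c h]
        simp [List.append_assoc]
      · rw [if_neg h]
        simp only [pvCisRevcomp, if_true, List.flatMap_cons]
        have hA : pvChunkA c = [c, pvRevComp c] := by
          simp only [pvChunkA, h, Bool.false_eq_true, if_false]
        rw [hA]
        simp [List.append_assoc]

-- B's ordered insert: membership and strict sortedness
theorem pvInsSU_mem (acc : List String) (x y : String) :
    y ∈ pvInsSU acc x ↔ y = x ∨ y ∈ acc := by
  induction acc with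
  | nil => simp [pvInsSU]
  | cons z t ih =>
      simp only [pvInsSU]
      by_cases h1 : x = z
      · subst h1
        simp only [beq_self_eq_true, if_true, List.mem_cons]
        tauto
      · have hb : (x == z) = false := by simp [h1]
        rw [hb]
        by_cases h2 : x < z
        · simp only [Bool.false_eq_true, if_false, if_pos h2, List.mem_cons]
        · simp only [Bool.false_eq_true, if_false, if_neg h2, List.mem_cons, ih]
          tauto

theorem pvInsSU_pairwise {acc : List String} (h : acc.Pairwise (· < ·)) (x : String) :
    (pvInsSU acc x).Pairwise (· < ·) := by
  induction acc with
  | nil => simp [pvInsSU]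
  | cons z t ih =>
      rcases List.pairwise_cons.mp h with ⟨hz, ht⟩
      simp only [pvInsSU]
      by_cases h1 : x = z
      · subst h1
        simpa using h
      · have hb : (x == z) = false := by simp [h1]
        rw [hb]
        simp only [Bool.false_eq_true, if_false]
        by_cases h2 : x < z
        · rw [if_pos h2]
          refine List.pairwise_cons.mpr ⟨?_, h⟩
          intro y hy
          rcases List.mem_cons.mp hy with rfl | hy
          · exact h2
          · exact lt_trans h2 (hz y hy)
        · rw [if_neg h2]
          have hzx : z < x := lt_of_le_of_ne (not_lt.mp h2) (fun e => h1 e.symm)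
          refine List.pairwise_cons.mpr ⟨?_, ih ht⟩
          intro y hy
          rcases (pvInsSU_mem t x y).mp hy with rfl | hy
          · exact hzx
          · exact hz y hy

theorem pvFoldIns_mem (l acc : List String) (y : String) :
    y ∈ l.foldl pvInsSU acc ↔ y ∈ acc ∨ y ∈ l := by
  induction l generalizing acc with
  | nil => simp
  | cons x t ih =>
      rw [List.foldl_cons, ih, pvInsSU_mem]
      simp [List.mem_cons]; tauto

theorem pvFoldIns_pairwise (l : List String) {acc : List String} (h : acc.Pairwise (· < ·)) :
    (l.foldl pvInsSU acc).Pairwise (· < ·) := by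
  induction l generalizing acc with
  | nil => exact h
  | cons x t ih => exact ih (pvInsSU_pairwise h x)

-- B's inner loop over "ATGC" is one insert-fold over the chunk of c
theorem pvInnerB (c : String) (acc : List String) :
    "ATGC".toList.foldl (fun out n =>
      let v := PySem.Str.replace c "N" (String.ofList [n])
      let out := pvInsSU out v
      if pvCisRevcomp then pvInsSU out (pvRevCompB v) else out) acc
    = (pvChunkB c).foldl pvInsSU acc := by
  rw [pvChunkB_eq]
  simp only [show ("ATGC" : String).toList = ['A', 'T', 'G', 'C'] from rfl,
    List.foldl_cons, List.foldl_nil, pvCisRevcomp, if_true, pvRevCompB_eq,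
    show String.ofList ['A'] = "A" from rfl, show String.ofList ['T'] = "T" from rfl,
    show String.ofList ['G'] = "G" from rfl, show String.ofList ['C'] = "C" from rfl]

-- B's nested loop is one insert-fold over the chunk stream
theorem pvLoopB (l : List String) (acc : List String) :
    l.foldl (fun out c =>
      "ATGC".toList.foldl (fun out n =>
        let v := PySem.Str.replace c "N" (String.ofList [n])
        let out := pvInsSU out v
        if pvCisRevcomp then pvInsSU out (pvRevCompB v) else out) out) acc
    = (l.flatMap pvChunkB).foldl pvInsSU acc := by
  induction l generalizing acc with
  | nil => simp
  | cons c t ih =>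
      rw [List.foldl_cons, ih, List.flatMap_cons, List.foldl_append, pvInnerB]

-- ===== VERDICT (by name: the statement is the Claim_ definition above) =====
theorem PrepareCisList_spec : Claim_equal_PrepareCisList := by
  intro cis _
  simp only [Spec_PrepareCisList, PrepareCisList, PrepareCisList_alt]
  rw [pvLoopA cis [], pvLoopB cis []]
  simp only [List.nil_append]
  have hpw : ((cis.flatMap pvChunkB).foldl pvInsSU []).Pairwise (· < ·) :=
    pvFoldIns_pairwise _ List.Pairwise.nil
  have hperm : ((cis.flatMap pvChunkB).foldl pvInsSU []).Perm
      (PySem.Set.ofList (cis.flatMap pvChunkA)) := by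
    rw [List.perm_ext_iff_of_nodup (hpw.imp ne_of_lt) (PySem.Set.nodup_ofList _)]
    intro x
    rw [pvFoldIns_mem, PySem.Set.mem_ofList, List.mem_flatMap, List.mem_flatMap]
    constructor
    · rintro (h | ⟨c, hc, hx⟩)
      · exact absurd h List.not_mem_nil
      · exact ⟨c, hc, (pvChunk_mem c x).mpr hx⟩
    · rintro ⟨c, hc, hx⟩
      exact Or.inr ⟨c, hc, (pvChunk_mem c x).mp hx⟩
  exact PySem.List.sorted_eq_of_perm_of_pairwise_lt _ _ (fun x => x) hperm hpw
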